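-- pv_equiv track=rewrite | github.com/SamDeiter/LocalMind | backend/model_router.py | _match_model_family
-- ===== SOURCE A (Python) =====
-- MODEL_PROFILES = {
--     # Coding specialists
--     "qwen2.5-coder": {"code": 10, "debug": 9, "explain": 8, "plan": 7, "general": 6, "creative": 5, "data": 7},
--     "deepseek-coder": {"code": 9,  "debug": 9, "explain": 7, "plan": 6, "general": 5, "creative": 4, "data": 7},
--     "codellama":      {"code": 8,  "debug": 7, "explain": 6, "plan": 5, "general": 4, "creative": 3, "data": 5},
--
--     # General purpose
--     "llama3":         {"code": 6, "debug": 6, "explain": 9, "plan": 9, "general": 9, "creative": 8, "data": 7},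
--     "llama3.1":       {"code": 7, "debug": 7, "explain": 9, "plan": 9, "general": 9, "creative": 8, "data": 8},
--     "llama3.2":       {"code": 7, "debug": 7, "explain": 9, "plan": 9, "general": 9, "creative": 8, "data": 8},
--     "gemma2":         {"code": 7, "debug": 7, "explain": 8, "plan": 8, "general": 8, "creative": 7, "data": 7},
--     "gemma3":         {"code": 7, "debug": 7, "explain": 9, "plan": 9, "general": 9, "creative": 8, "data": 8},
--     "phi3":           {"code": 7, "debug": 6, "explain": 8, "plan": 7, "general": 8, "creative": 7, "data": 7},
--     "phi4":           {"code": 8, "debug": 7, "explain": 9, "plan": 8, "general": 9, "creative": 8, "data": 8},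
--     "qwen2.5":        {"code": 8, "debug": 7, "explain": 8, "plan": 8, "general": 8, "creative": 7, "data": 8},
--     "qwen3":          {"code": 8, "debug": 8, "explain": 9, "plan": 9, "general": 9, "creative": 8, "data": 8},
--
--     # Reasoning / planning
--     "mistral":        {"code": 7, "debug": 7, "explain": 8, "plan": 8, "general": 8, "creative": 7, "data": 7},
--     "mixtral":        {"code": 7, "debug": 7, "explain": 9, "plan": 9, "general": 9, "creative": 8, "data": 8},
--     "command-r":      {"code": 6, "debug": 6, "explain": 8, "plan": 8, "general": 8, "creative": 7, "data": 8},
--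
--     # Creative / writing
--     "neural-chat":    {"code": 4, "debug": 4, "explain": 7, "plan": 6, "general": 7, "creative": 8, "data": 5},
-- }
--
-- def _match_model_family(model_name: str) -> str | None:
--     """Match an installed model name to a known family profile."""
--     name_lower = model_name.lower()
--     # Try exact prefix match first, longest match wins
--     matches = []
--     for family in MODEL_PROFILES:
--         if name_lower.startswith(family):
--             matches.append(family)
--     if matches:
--         return max(matches, key=len)  # Longest match
--     return None
-- ===== SOURCE B (Python) =====
-- MODEL_PROFILES = {
--     "qwen2.5-coder": {"code": 10, "debug": 9, "explain": 8, "plan": 7, "general": 6, "creative": 5, "data": 7},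
--     "deepseek-coder": {"code": 9,  "debug": 9, "explain": 7, "plan": 6, "general": 5, "creative": 4, "data": 7},
--     "codellama":      {"code": 8,  "debug": 7, "explain": 6, "plan": 5, "general": 4, "creative": 3, "data": 5},
--     "llama3":         {"code": 6, "debug": 6, "explain": 9, "plan": 9, "general": 9, "creative": 8, "data": 7},
--     "llama3.1":       {"code": 7, "debug": 7, "explain": 9, "plan": 9, "general": 9, "creative": 8, "data": 8},
--     "llama3.2":       {"code": 7, "debug": 7, "explain": 9, "plan": 9, "general": 9, "creative": 8, "data": 8},
--     "gemma2":         {"code": 7, "debug": 7, "explain": 8, "plan": 8, "general": 8, "creative": 7, "data": 7},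
--     "gemma3":         {"code": 7, "debug": 7, "explain": 9, "plan": 9, "general": 9, "creative": 8, "data": 8},
--     "phi3":           {"code": 7, "debug": 6, "explain": 8, "plan": 7, "general": 8, "creative": 7, "data": 7},
--     "phi4":           {"code": 8, "debug": 7, "explain": 9, "plan": 8, "general": 9, "creative": 8, "data": 8},
--     "qwen2.5":        {"code": 8, "debug": 7, "explain": 8, "plan": 8, "general": 8, "creative": 7, "data": 8},
--     "qwen3":          {"code": 8, "debug": 8, "explain": 9, "plan": 9, "general": 9, "creative": 8, "data": 8},
--     "mistral":        {"code": 7, "debug": 7, "explain": 8, "plan": 8, "general": 8, "creative": 7, "data": 7},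
--     "mixtral":        {"code": 7, "debug": 7, "explain": 9, "plan": 9, "general": 9, "creative": 8, "data": 8},
--     "command-r":      {"code": 6, "debug": 6, "explain": 8, "plan": 8, "general": 8, "creative": 7, "data": 8},
--     "neural-chat":    {"code": 4, "debug": 4, "explain": 7, "plan": 6, "general": 7, "creative": 8, "data": 5},
-- }
--
-- _MAX_FAMILY_LEN = max(map(len, MODEL_PROFILES))
--
-- def _match_model_family(model_name: str) -> str | None:
--     """Match an installed model name to a known family profile.
--
--     Uses the profile dict as a prefix-membership table: walk the lowered
--     name's prefixes from longest to shortest and return the first one that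
--     is a known family (equivalent to 'longest matching family wins', since
--     two distinct prefixes of one string cannot have equal length).
--     """
--     name_lower = model_name.lower()
--     for length in range(min(len(name_lower), _MAX_FAMILY_LEN), 0, -1):
--         candidate = name_lower[:length]
--         if candidate in MODEL_PROFILES:
--             return candidate
--     return None
-- ===== Notes on version B (the rewrite author's own statement) =====
-- stated objective: idiomatic
-- what changed: Instead of scanning all 16 families, collecting every matching one into a list and taking max(key=len), B walks the lowered name's prefixes from longest to shortest and returns the first prefix that is a key of MODEL_PROFILES (dict membership as a prefix table).
import Mathlib
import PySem

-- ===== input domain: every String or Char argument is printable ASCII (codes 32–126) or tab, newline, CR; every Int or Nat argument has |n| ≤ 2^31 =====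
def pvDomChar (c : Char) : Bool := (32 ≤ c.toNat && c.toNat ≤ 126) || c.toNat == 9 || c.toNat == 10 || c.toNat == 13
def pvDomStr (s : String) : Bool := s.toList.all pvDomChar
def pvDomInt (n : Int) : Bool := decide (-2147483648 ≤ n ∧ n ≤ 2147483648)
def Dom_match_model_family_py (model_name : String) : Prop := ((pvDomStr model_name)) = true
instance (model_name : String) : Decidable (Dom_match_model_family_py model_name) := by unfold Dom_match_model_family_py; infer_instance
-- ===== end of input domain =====

-- B walks the lowered name's prefixes from longest to shortest and returns the first one that is a
-- dict key, instead of scanning all families and taking the longest match (objective: idiomatic).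

-- the keys of MODEL_PROFILES, in insertion order (the profile values are never used)
def pvFamilies : List String :=
  ["qwen2.5-coder", "deepseek-coder", "codellama",
   "llama3", "llama3.1", "llama3.2", "gemma2", "gemma3", "phi3", "phi4", "qwen2.5", "qwen3",
   "mistral", "mixtral", "command-r",
   "neural-chat"]

-- ===== PORT A =====
def match_model_family_py (model_name : String) : Option String :=
  let nameLower := PySem.Str.lower model_name
  let matchesList := pvFamilies.foldl
    (fun acc family => if PySem.Str.startswith nameLower family then acc ++ [family] else acc) []
  if matchesList.isEmpty then none
  else PySem.List.max? matchesList (fun f => PySem.Str.len f)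

-- ===== PORT B =====
-- _MAX_FAMILY_LEN = max(map(len, MODEL_PROFILES)) — Python max over a (nonempty) literal list, ported as foldl max 0
def pvMaxFamilyLen : Nat := (pvFamilies.map (fun f => f.toList.length)).foldl Nat.max 0

-- for length in range(min(len(name_lower), _MAX_FAMILY_LEN), 0, -1): … (countdown over prefix lengths)
def pvPrefixLoop (s : List Char) : Nat → Option String
  | 0 => none
  | L + 1 =>
    let candidate := String.ofList (s.take (L + 1))
    if candidate ∈ pvFamilies then some candidate else pvPrefixLoop s L

def match_model_family_py_alt (model_name : String) : Option String :=
  let nameLower := PySem.Str.lower model_name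
  pvPrefixLoop nameLower.toList (min nameLower.toList.length pvMaxFamilyLen)

-- ===== PRECONDITION & SPEC =====
def Spec_match_model_family_py (model_name : String) (out : Option String) : Prop := out = match_model_family_py_alt model_name
instance (model_name : String) (out : Option String) : Decidable (Spec_match_model_family_py model_name out) := by unfold Spec_match_model_family_py; infer_instance

-- ===== CLAIM (what is proved, stated in full; the proofs are below) =====
def Claim_equal_match_model_family_py : Prop := ∀ (model_name : String), Dom_match_model_family_py model_name → Spec_match_model_family_py model_name (match_model_family_py model_name)

-- ===== LEMMAS AND PROOFS =====

-- every family name is nonempty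
lemma pvFamilies_len_pos : ∀ k ∈ pvFamilies, 1 ≤ k.toList.length := by decide

-- no family name is longer than the precomputed cap
lemma pvFamilies_len_le : ∀ k ∈ pvFamilies, k.toList.length ≤ pvMaxFamilyLen := by decide

-- if the countdown loop returns a family, it is a prefix of s of maximal length among
-- the family prefixes of s whose length is ≤ the current counter
lemma pvPrefixLoop_some (s : List Char) (n : Nat) (r : String)
    (h : pvPrefixLoop s n = some r) :
    r ∈ pvFamilies ∧ r.toList <+: s ∧
      ∀ k ∈ pvFamilies, k.toList <+: s → k.toList.length ≤ n →
        k.toList.length ≤ r.toList.length := by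
  induction n with
  | zero => simp [pvPrefixLoop] at h
  | succ L ih =>
    simp only [pvPrefixLoop] at h
    by_cases hc : String.ofList (s.take (L + 1)) ∈ pvFamilies
    · rw [if_pos hc] at h
      obtain rfl : String.ofList (s.take (L + 1)) = r := Option.some.inj h
      refine ⟨hc, ?_, ?_⟩
      · rw [String.toList_ofList]
        exact List.take_prefix _ _
      · intro k _ hkpre hklen
        rw [String.toList_ofList, List.length_take]
        exact le_min hklen hkpre.length_le
    · rw [if_neg hc] at h
      obtain ⟨hr, hrpre, hmax⟩ := ih h
      refine ⟨hr, hrpre, ?_⟩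
      intro k hk hkpre hklen
      by_cases hL : k.toList.length ≤ L
      · exact hmax k hk hkpre hL
      · exfalso
        have hEq : k.toList.length = L + 1 := by omega
        apply hc
        have h1 := List.prefix_iff_eq_take.mp hkpre
        rw [hEq] at h1
        rw [← h1, String.ofList_toList]
        exact hk

-- if the countdown loop returns None, no family prefix of s has length ≤ the counter
lemma pvPrefixLoop_none (s : List Char) (n : Nat) (h : pvPrefixLoop s n = none) :
    ∀ k ∈ pvFamilies, k.toList <+: s → ¬ k.toList.length ≤ n := by
  induction n with
  | zero =>
    intro k hk _ hlen
    have := pvFamilies_len_pos k hk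
    omega
  | succ L ih =>
    intro k hk hkpre hklen
    simp only [pvPrefixLoop] at h
    by_cases hc : String.ofList (s.take (L + 1)) ∈ pvFamilies
    · rw [if_pos hc] at h
      simp at h
    · rw [if_neg hc] at h
      by_cases hL : k.toList.length ≤ L
      · exact ih h k hk hkpre hL
      · apply hc
        have hEq : k.toList.length = L + 1 := by omega
        have h1 := List.prefix_iff_eq_take.mp hkpre
        rw [hEq] at h1
        rw [← h1, String.ofList_toList]
        exact hk

-- startswith, on the list side
lemma pv_startswith_iff (nl f : String) :
    PySem.Str.startswith nl f = true ↔ f.toList <+: nl.toList := by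
  rw [PySem.Str.startswith_eq, PySem.Chars.startswith_iff]

-- ===== VERDICT (by name: the statement is the Claim_ definition above) =====
theorem match_model_family_py_spec : Claim_equal_match_model_family_py := by
  intro model_name _
  simp only [Spec_match_model_family_py, match_model_family_py, match_model_family_py_alt]
  set nl := PySem.Str.lower model_name with hnl
  set s : List Char := nl.toList with hs
  have hfold := PySem.List.foldl_append_if
      (fun family => PySem.Str.startswith nl family) (fun family => family) pvFamilies []
  rw [hfold]
  simp only [List.nil_append, List.map_id']
  set M : List String := pvFamilies.filter (fun family => PySem.Str.startswith nl family) with hM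
  cases hB : pvPrefixLoop s (min s.length pvMaxFamilyLen) with
  | none =>
    have hMnil : M = [] := by
      rw [hM, List.filter_eq_nil_iff]
      intro k hk hsw
      have hkpre : k.toList <+: s := (pv_startswith_iff nl k).mp hsw
      exact pvPrefixLoop_none s (min s.length pvMaxFamilyLen) hB k hk hkpre (le_min hkpre.length_le (pvFamilies_len_le k hk))
    rw [hMnil]
    rfl
  | some r =>
    obtain ⟨hrF, hrpre, hrmax⟩ := pvPrefixLoop_some s (min s.length pvMaxFamilyLen) r hB
    have hrM : r ∈ M := by
      rw [hM, List.mem_filter]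
      exact ⟨hrF, (pv_startswith_iff nl r).mpr hrpre⟩
    have hMne : M.isEmpty = false := by
      rw [List.isEmpty_eq_false_iff_exists_mem]
      exact ⟨r, hrM⟩
    rw [hMne]
    simp only [Bool.false_eq_true, if_false]
    cases hA : PySem.List.max? M (fun f => PySem.Str.len f) with
    | none =>
      rw [PySem.List.max?_eq_none_iff] at hA
      rw [hA] at hrM
      exact absurd hrM (List.not_mem_nil)
    | some m =>
      have hmM := PySem.List.max?_mem hA
      have hmF : m ∈ pvFamilies := (List.mem_filter.mp (hM ▸ hmM)).1
      have hmpre : m.toList <+: s :=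
        (pv_startswith_iff nl m).mp (List.mem_filter.mp (hM ▸ hmM)).2
      have h1 : PySem.Str.len r ≤ PySem.Str.len m := PySem.List.max?_isMax hA r hrM
      have h2 : m.toList.length ≤ r.toList.length :=
        hrmax m hmF hmpre (le_min hmpre.length_le (pvFamilies_len_le m hmF))
      have hlen : m.toList.length = r.toList.length := by
        rw [PySem.Str.len_eq, PySem.Str.len_eq] at h1
        omega
      have hlist : m.toList = r.toList := by
        have hm1 := List.prefix_iff_eq_take.mp hmpre
        have hr1 := List.prefix_iff_eq_take.mp hrpre
        rw [hm1, hr1, hlen]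
      have : m = r := by
        rw [← @String.ofList_toList m, ← @String.ofList_toList r, hlist]
      rw [this]
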